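-- pv_equiv track=rewrite | github.com/kardinal95/RegEx | py/fsm.py | split_by_top_or
-- ===== SOURCE A (Python) =====
-- def split_by_top_or(item: str) -> list:
--     level = 0
--     points = [-1]
--     for index, sym in enumerate(item):
--         if sym == '(':
--             level += 1
--         elif sym == ')':
--             level -= 1
--         elif sym == '|' and level == 0:
--             points.append(index)
--     if len(points) == 1:
--         return [item]
--     return [item[i + 1:j] for i, j in zip(points, points[1:] + [None])]
-- ===== SOURCE B (Python) =====
-- def split_by_top_or(item: str) -> list:
--     level = 0
--     result = []
--     buf = []
--     for sym in item:
--         if sym == '(':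
--             level += 1
--             buf.append(sym)
--         elif sym == ')':
--             level -= 1
--             buf.append(sym)
--         elif sym == '|' and level == 0:
--             result.append(''.join(buf))
--             buf = []
--         else:
--             buf.append(sym)
--     result.append(''.join(buf))
--     return result
-- ===== Notes on version B (the rewrite author's own statement) =====
-- stated objective: simpler
-- what changed: A collects the indices of top-level OR bars in one pass and then builds the segments in a second zip/slicing pass; B does a single pass that keeps a current-segment buffer and emits each segment the moment a top-level bar (or the end of the string) is reached, so the index list and the slicing pass disappear.
import Mathlib
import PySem

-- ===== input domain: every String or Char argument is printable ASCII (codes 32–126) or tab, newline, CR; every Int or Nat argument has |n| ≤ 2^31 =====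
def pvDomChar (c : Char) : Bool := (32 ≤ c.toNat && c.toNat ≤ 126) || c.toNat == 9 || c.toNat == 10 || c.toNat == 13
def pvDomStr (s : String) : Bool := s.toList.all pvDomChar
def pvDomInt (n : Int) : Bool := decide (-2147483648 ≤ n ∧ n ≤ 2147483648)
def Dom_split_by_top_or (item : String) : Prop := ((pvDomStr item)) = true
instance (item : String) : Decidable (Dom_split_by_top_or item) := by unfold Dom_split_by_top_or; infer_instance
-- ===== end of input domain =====

-- B replaces A's two-pass scheme (collect split indices, then a separate zip/slicing pass) by a
-- single pass that emits each segment as it is completed (objective: simpler).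

-- ===== PORT A =====
def split_by_top_or (item : String) : List String :=
  let cs := item.toList
  let st := (PySem.List.enumerate cs 0).foldl
    (fun (acc : Int × List Int) p =>
      if p.2 = '(' then (acc.1 + 1, acc.2)
      else if p.2 = ')' then (acc.1 - 1, acc.2)
      else if p.2 = '|' ∧ acc.1 = 0 then (acc.1, acc.2 ++ [p.1])
      else acc) ((0 : Int), [(-1 : Int)])
  let points := st.2
  if points.length = 1 then [item]
  else (points.zip (points.tail.map some ++ [none])).map
    (fun ij => String.ofList (PySem.List.slice cs (some (ij.1 + 1)) ij.2))

-- ===== PORT B =====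
def pvBGo : List Char → Int → List Char → List String → List String
  | [], _, buf, res => res ++ [String.ofList buf]
  | c :: rest, level, buf, res =>
    if c = '(' then pvBGo rest (level + 1) (buf ++ [c]) res
    else if c = ')' then pvBGo rest (level - 1) (buf ++ [c]) res
    else if c = '|' ∧ level = 0 then pvBGo rest level [] (res ++ [String.ofList buf])
    else pvBGo rest level (buf ++ [c]) res

def split_by_top_or_alt (item : String) : List String :=
  pvBGo item.toList 0 [] []

-- ===== PRECONDITION & SPEC =====
def Spec_split_by_top_or (item : String) (out : List String) : Prop := out = split_by_top_or_alt item
instance (item : String) (out : List String) : Decidable (Spec_split_by_top_or item out) := by unfold Spec_split_by_top_or; infer_instance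

-- ===== CLAIM (what is proved, stated in full; the proofs are below) =====
def Claim_equal_split_by_top_or : Prop := ∀ (item : String), Dom_split_by_top_or item → Spec_split_by_top_or item (split_by_top_or item)

-- ===== LEMMAS AND PROOFS =====

-- reference segmentation: the segments of cs split at top-level '|' (always a nonempty list)
def pvConsHead (c : Char) : List (List Char) → List (List Char)
  | [] => [[c]]
  | s :: rest => (c :: s) :: rest

def pvSegs : List Char → Int → List (List Char)
  | [], _ => [[]]
  | c :: cs, lvl =>
    if c = '(' then pvConsHead c (pvSegs cs (lvl + 1))
    else if c = ')' then pvConsHead c (pvSegs cs (lvl - 1))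
    else if c = '|' ∧ lvl = 0 then [] :: pvSegs cs lvl
    else pvConsHead c (pvSegs cs lvl)

-- absolute positions (counted from offset s) of the top-level '|' characters
def pvPts : List Char → Int → Int → List Int
  | [], _, _ => []
  | c :: cs, lvl, s =>
    if c = '(' then pvPts cs (lvl + 1) (s + 1)
    else if c = ')' then pvPts cs (lvl - 1) (s + 1)
    else if c = '|' ∧ lvl = 0 then s :: pvPts cs lvl (s + 1)
    else pvPts cs lvl (s + 1)

def pvLvlF : List Char → Int → Int
  | [], lvl => lvl
  | c :: cs, lvl =>
    pvLvlF cs (if c = '(' then lvl + 1 else if c = ')' then lvl - 1 else lvl)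

-- recursive form of A's slicing comprehension
def pvSl (cs : List Char) : List Int → List (List Char)
  | [] => []
  | [p] => [PySem.List.slice cs (some (p + 1)) none]
  | p :: q :: rest => PySem.List.slice cs (some (p + 1)) (some q) :: pvSl cs (q :: rest)

theorem pvSl_one (cs : List Char) (p : Int) :
    pvSl cs [p] = [PySem.List.slice cs (some (p + 1)) none] := rfl

theorem pvSl_two (cs : List Char) (p q : Int) (rest : List Int) :
    pvSl cs (p :: q :: rest)
      = PySem.List.slice cs (some (p + 1)) (some q) :: pvSl cs (q :: rest) := rfl

theorem pvNegOneAdd : ((-1 : Int) + 1) = 0 := by norm_num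

theorem pvConsHead_ne_nil (c : Char) (L : List (List Char)) : pvConsHead c L ≠ [] := by
  cases L <;> simp [pvConsHead]

theorem pvSegs_ne_nil (cs : List Char) (lvl : Int) : pvSegs cs lvl ≠ [] := by
  cases cs with
  | nil => simp [pvSegs]
  | cons c cs =>
    simp only [pvSegs]
    split_ifs
    · exact pvConsHead_ne_nil _ _
    · exact pvConsHead_ne_nil _ _
    · simp
    · exact pvConsHead_ne_nil _ _

theorem pvFoldA (cs : List Char) : ∀ (s lvl : Int) (acc : List Int),
    (PySem.List.enumerate cs s).foldl
      (fun (acc : Int × List Int) p =>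
        if p.2 = '(' then (acc.1 + 1, acc.2)
        else if p.2 = ')' then (acc.1 - 1, acc.2)
        else if p.2 = '|' ∧ acc.1 = 0 then (acc.1, acc.2 ++ [p.1])
        else acc) (lvl, acc)
    = (pvLvlF cs lvl, acc ++ pvPts cs lvl s) := by
  induction cs with
  | nil => intro s lvl acc; simp [PySem.List.enumerate_nil, pvLvlF, pvPts]
  | cons c cs ih =>
    intro s lvl acc
    rw [PySem.List.enumerate_cons, List.foldl_cons]
    simp only [pvLvlF, pvPts]
    by_cases h1 : c = '('
    · simp [h1, ih]
    · by_cases h2 : c = ')'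
      · simp [h2, ih]
      · by_cases h3 : c = '|' ∧ lvl = 0
        · simp [h3, ih]
        · simp [if_neg h1, if_neg h2, if_neg h3, ih]

theorem pvPts_ge (cs : List Char) : ∀ (lvl s : Int) (p : Int), p ∈ pvPts cs lvl s → s ≤ p := by
  induction cs with
  | nil => intro lvl s p hp; simp [pvPts] at hp
  | cons c cs ih =>
    intro lvl s p hp
    simp only [pvPts] at hp
    split_ifs at hp with h1 h2 h3
    · have := ih _ _ _ hp; omega
    · have := ih _ _ _ hp; omega
    · rcases List.mem_cons.mp hp with h | h
      · omega
      · have := ih _ _ _ h; omega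
    · have := ih _ _ _ hp; omega

theorem pvPts_shift (cs : List Char) : ∀ (lvl s : Int),
    pvPts cs lvl (s + 1) = (pvPts cs lvl s).map (· + 1) := by
  induction cs with
  | nil => intro lvl s; simp [pvPts]
  | cons c cs ih =>
    intro lvl s
    simp only [pvPts]
    split_ifs <;> simp [ih]

theorem pvPts_shift1 (cs : List Char) (lvl : Int) :
    pvPts cs lvl 1 = (pvPts cs lvl 0).map (· + 1) := by
  have := pvPts_shift cs lvl 0
  simpa using this

-- A's zip/map comprehension equals the recursive slicer
theorem pvZip_eq_sl (cs : List Char) : ∀ (points : List Int),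
    (points.zip (points.tail.map some ++ [none])).map
      (fun ij => PySem.List.slice cs (some (ij.1 + 1)) ij.2) = pvSl cs points := by
  intro points
  induction points with
  | nil => simp [pvSl]
  | cons p rest ih =>
    cases rest with
    | nil => simp [pvSl]
    | cons q r =>
      simp only [List.tail_cons, List.map_cons, List.zip_cons_cons, List.cons_append,
        List.map_cons, pvSl_two]
      exact congrArg _ ih

-- slicing shifts under a cons when the head point is ≥ -1 and the later points are ≥ 0
theorem pvSl_shift (c : Char) (cs : List Char) : ∀ (ps : List Int),
    (∀ p ∈ ps, -1 ≤ p) → (∀ q ∈ ps.tail, 0 ≤ q) →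
    pvSl (c :: cs) (ps.map (· + 1)) = pvSl cs ps := by
  intro ps
  induction ps with
  | nil => intro _ _; simp [pvSl]
  | cons p rest ih =>
    intro h ht
    cases rest with
    | nil =>
      simp only [List.map_cons, List.map_nil, pvSl_one]
      have hp : -1 ≤ p := h p (by simp)
      rw [PySem.List.slice_from _ (by omega), PySem.List.slice_from _ (by omega)]
      have hB : (p + 1 + 1).toNat = (p + 1).toNat + 1 := by omega
      rw [hB, List.drop_succ_cons]
    | cons q r =>
      have hp : -1 ≤ p := h p (by simp)
      have hq : 0 ≤ q := ht q (by simp)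
      simp only [List.map_cons, pvSl_two]
      refine List.cons_eq_cons.mpr ⟨?_, ?_⟩
      · rw [PySem.List.slice_toNat _ (by omega) (by omega),
          PySem.List.slice_toNat _ (by omega) (by omega)]
        have hB : (p + 1 + 1).toNat = (p + 1).toNat + 1 := by omega
        rw [hB, List.drop_succ_cons]
        congr 1
        omega
      · have h1 : ∀ x ∈ q :: r, -1 ≤ x := by
          intro x hx; have := ht x (by simpa using hx); omega
        have h2 : ∀ x ∈ (q :: r).tail, 0 ≤ x := by
          intro x hx; exact ht x (by simp at hx ⊢; exact Or.inr hx)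
        have := ih h1 h2
        simpa [List.map_cons] using this

theorem pvHeadSlice (c : Char) (cs : List Char) (q : Int) (hq : 0 ≤ q) :
    PySem.List.slice (c :: cs) (some 0) (some (q + 1))
      = c :: PySem.List.slice cs (some 0) (some q) := by
  rw [PySem.List.slice_toNat _ le_rfl (by omega), PySem.List.slice_toNat _ le_rfl hq]
  simp only [Int.toNat_zero, Nat.sub_zero, List.drop_zero]
  have e : (q + 1).toNat = q.toNat + 1 := by omega
  rw [e, List.take_succ_cons]

-- the slices taken at the top-level bar positions are exactly the reference segments
theorem pvSl_eq_segs (cs : List Char) : ∀ (lvl : Int),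
    pvSl cs (-1 :: pvPts cs lvl 0) = pvSegs cs lvl := by
  induction cs with
  | nil =>
    intro lvl
    simp only [pvPts, pvSegs, pvSl_one, pvNegOneAdd]
    rw [PySem.List.slice_from _ le_rfl]
    simp
  | cons c cs ih =>
    intro lvl
    have hge0 : ∀ (lvl' : Int) (p : Int), p ∈ pvPts cs lvl' 0 → 0 ≤ p :=
      fun lvl' p hp => pvPts_ge cs lvl' 0 p hp
    have hnb : ∀ (lvl' : Int),
        pvSl (c :: cs) (-1 :: pvPts cs lvl' 1) = pvConsHead c (pvSl cs (-1 :: pvPts cs lvl' 0)) := by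
      intro lvl'
      rw [pvPts_shift1]
      cases hq : pvPts cs lvl' 0 with
      | nil =>
        simp only [List.map_nil, pvSl_one, pvConsHead, pvNegOneAdd]
        rw [PySem.List.slice_from _ le_rfl, PySem.List.slice_from _ le_rfl]
        simp
      | cons q r =>
        have hq0 : 0 ≤ q := hge0 _ q (by rw [hq]; exact List.mem_cons_self ..)
        simp only [List.map_cons, pvSl_two, pvConsHead, pvNegOneAdd]
        refine List.cons_eq_cons.mpr ⟨pvHeadSlice c cs q hq0, ?_⟩
        have h1 : ∀ x ∈ q :: r, -1 ≤ x := by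
          intro x hx
          have := hge0 lvl' x (by rw [hq]; exact hx); omega
        have h2 : ∀ x ∈ (q :: r).tail, 0 ≤ x := by
          intro x hx
          exact hge0 lvl' x (by rw [hq]; exact List.mem_cons_of_mem q hx)
        have := pvSl_shift c cs (q :: r) h1 h2
        simpa [List.map_cons] using this
    simp only [pvPts, pvSegs, zero_add]
    by_cases h1 : c = '('
    · rw [if_pos h1, if_pos h1, hnb (lvl + 1), ih (lvl + 1)]
    · by_cases h2 : c = ')'
      · rw [if_neg h1, if_neg h1, if_pos h2, if_pos h2, hnb (lvl - 1), ih (lvl - 1)]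
      · by_cases h3 : c = '|' ∧ lvl = 0
        · rw [if_neg h1, if_neg h1, if_neg h2, if_neg h2, if_pos h3, if_pos h3]
          rw [pvPts_shift1]
          rw [pvSl_two]
          refine List.cons_eq_cons.mpr ⟨?_, ?_⟩
          · rw [pvNegOneAdd, PySem.List.slice_toNat _ le_rfl le_rfl]
            simp
          · have h1' : ∀ x ∈ (-1 : Int) :: pvPts cs lvl 0, -1 ≤ x := by
              intro x hx
              rcases List.mem_cons.mp hx with h | h
              · omega
              · have := hge0 lvl x h; omega
            have h2' : ∀ x ∈ ((-1 : Int) :: pvPts cs lvl 0).tail, 0 ≤ x := by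
              intro x hx
              exact hge0 lvl x (by simpa using hx)
            have hsh := pvSl_shift c cs (-1 :: pvPts cs lvl 0) h1' h2'
            rw [List.map_cons, pvNegOneAdd] at hsh
            rw [hsh, ih lvl]
        · rw [if_neg h1, if_neg h1, if_neg h2, if_neg h2, if_neg h3, if_neg h3,
            hnb lvl, ih lvl]

-- B's accumulator loop produces the reference segments, the first prefixed with buf
theorem pvBGo_eq (cs : List Char) : ∀ (lvl : Int) (buf : List Char) (res : List String),
    pvBGo cs lvl buf res
      = res ++ ((pvSegs cs lvl).modifyHead (buf ++ ·)).map String.ofList := by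
  induction cs with
  | nil => intro lvl buf res; simp [pvBGo, pvSegs]
  | cons c cs ih =>
    intro lvl buf res
    simp only [pvBGo, pvSegs]
    by_cases h1 : c = '('
    · rw [if_pos h1, if_pos h1, ih]
      cases hs : pvSegs cs (lvl + 1) with
      | nil => exact absurd hs (pvSegs_ne_nil cs (lvl + 1))
      | cons s r => simp [pvConsHead]
    · by_cases h2 : c = ')'
      · rw [if_neg h1, if_neg h1, if_pos h2, if_pos h2, ih]
        cases hs : pvSegs cs (lvl - 1) with
        | nil => exact absurd hs (pvSegs_ne_nil cs (lvl - 1))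
        | cons s r => simp [pvConsHead]
      · by_cases h3 : c = '|' ∧ lvl = 0
        · rw [if_neg h1, if_neg h1, if_neg h2, if_neg h2, if_pos h3, if_pos h3, ih]
          cases hs : pvSegs cs lvl with
          | nil => exact absurd hs (pvSegs_ne_nil cs lvl)
          | cons s r => simp
        · rw [if_neg h1, if_neg h1, if_neg h2, if_neg h2, if_neg h3, if_neg h3, ih]
          cases hs : pvSegs cs lvl with
          | nil => exact absurd hs (pvSegs_ne_nil cs lvl)
          | cons s r => simp [pvConsHead]

-- ===== VERDICT (by name: the statement is the Claim_ definition above) =====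
theorem split_by_top_or_spec : Claim_equal_split_by_top_or := by
  intro item _
  unfold Spec_split_by_top_or split_by_top_or split_by_top_or_alt
  simp only []
  rw [pvFoldA item.toList 0 0 [-1]]
  rw [pvBGo_eq item.toList 0 [] []]
  have hsl := pvSl_eq_segs item.toList 0
  by_cases hp : pvPts item.toList 0 0 = []
  · -- no top-level '|': A returns [item], and the single reference segment is the whole string
    rw [hp] at hsl
    rw [pvSl_one, pvNegOneAdd, PySem.List.slice_from _ le_rfl] at hsl
    simp only [Int.toNat_zero, List.drop_zero] at hsl
    rw [hp]
    simp only [List.append_nil, List.length_cons, List.length_nil]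
    rw [← hsl]
    simp [String.ofList_toList]
  · -- at least one top-level '|': A's slices are the reference segments
    have hlen : ([(-1 : Int)] ++ pvPts item.toList 0 0).length ≠ 1 := by
      cases hq : pvPts item.toList 0 0 with
      | nil => exact absurd hq hp
      | cons q r' => simp
    rw [if_neg hlen]
    rw [show ([(-1 : Int)] ++ pvPts item.toList 0 0) = -1 :: pvPts item.toList 0 0 from rfl]
    rw [show (fun ij : Int × Option Int =>
          String.ofList (PySem.List.slice item.toList (some (ij.1 + 1)) ij.2))
        = (String.ofList ∘ fun ij : Int × Option Int =>
            PySem.List.slice item.toList (some (ij.1 + 1)) ij.2) from rfl]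
    rw [← List.map_map, pvZip_eq_sl item.toList (-1 :: pvPts item.toList 0 0), hsl]
    cases hs : pvSegs item.toList 0 with
    | nil => exact absurd hs (pvSegs_ne_nil item.toList 0)
    | cons s r => simp
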